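-- pv_equiv track=rewrite | github.com/4iKZ/TEXT-TO-SQL | sql_processor.py | _split_select_columns
-- ===== SOURCE A (Python) =====
-- def _split_select_columns(select_part):
--     """智能分割SELECT部分的列名，考虑函数调用中的逗号"""
--     columns = []
--     current_col = ""
--     paren_count = 0
--     in_quotes = False
--
--     for char in select_part:
--         if char == "'" and not in_quotes:
--             in_quotes = True
--         elif char == "'" and in_quotes:
--             in_quotes = False
--         elif not in_quotes and char == '(':
--             paren_count += 1
--         elif not in_quotes and char == ')':
--             paren_count -= 1
--         elif char == ',' and paren_count == 0 and not in_quotes: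
--             # 这是一个真正的列分隔符
--             if current_col.strip():
--                 columns.append(current_col.strip())
--             current_col = ""
--             continue
--
--         current_col += char
--
--     # 添加最后一列
--     if current_col.strip():
--         columns.append(current_col.strip())
--
--     return columns
-- ===== SOURCE B (Python) =====
-- def _split_select_columns(select_part):
--     """Split on ',' first, then re-join fragments that are inside parens/quotes."""
--     parts = select_part.split(',')
--     columns = []
--     buf = ""
--     paren = 0
--     quotes = False
--     for part in parts[:-1]:
--         buf += part
--         for ch in part:
--             if ch == "'":
--                 quotes = not quotes
--             elif ch == '(' and not quotes:
--                 paren += 1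
--             elif ch == ')' and not quotes:
--                 paren -= 1
--         if paren == 0 and not quotes:
--             col = buf.strip()
--             if col:
--                 columns.append(col)
--             buf = ""
--         else:
--             buf += ','
--     buf += parts[-1]
--     col = buf.strip()
--     if col:
--         columns.append(col)
--     return columns
-- ===== Notes on version B (the rewrite author's own statement) =====
-- stated objective: faster
-- what changed: B replaces A's single character-by-character accumulator loop with a split-first pass: it splits the string on the comma separator up front, then folds over the fragments, re-joining those whose paren/quote scan says the separator was inside parentheses or quotes and emitting complete buffers.
import Mathlib
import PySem

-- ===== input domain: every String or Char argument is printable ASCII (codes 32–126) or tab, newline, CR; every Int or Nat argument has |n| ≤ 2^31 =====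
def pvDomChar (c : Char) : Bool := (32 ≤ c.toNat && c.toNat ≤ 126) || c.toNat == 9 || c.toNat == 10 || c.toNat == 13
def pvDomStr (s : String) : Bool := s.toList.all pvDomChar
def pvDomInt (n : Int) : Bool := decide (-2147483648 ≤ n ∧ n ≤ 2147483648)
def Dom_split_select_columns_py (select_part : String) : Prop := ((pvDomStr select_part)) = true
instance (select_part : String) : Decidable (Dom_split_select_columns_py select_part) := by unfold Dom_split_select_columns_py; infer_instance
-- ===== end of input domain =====

-- B splits the string on the comma separator first and re-joins fragments whose separator was inside parens/quotes
-- equivalence of the return values with A's single char-accumulator loop is proved for all inputs.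

-- ===== PORT A =====
-- A's loop state: (columns, current_col, paren_count, in_quotes); branches in A's order.
def pvStepA (st : List (List Char) × List Char × Int × Bool) (c : Char) :
    List (List Char) × List Char × Int × Bool :=
  let (cols, cur, p, q) := st
  if c == '\'' && !q then (cols, cur ++ [c], p, true)
  else if c == '\'' && q then (cols, cur ++ [c], p, false)
  else if !q && c == '(' then (cols, cur ++ [c], p + 1, q)
  else if !q && c == ')' then (cols, cur ++ [c], p - 1, q)
  else if c == ',' && p == 0 && !q then
    (if (PySem.Chars.strip cur).isEmpty then cols else cols ++ [PySem.Chars.strip cur], [], p, q)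
  else (cols, cur ++ [c], p, q)

def split_select_columns_py (select_part : String) : List String :=
  let st := select_part.toList.foldl pvStepA ([], [], (0 : Int), false)
  let cols := st.1
  let cur := st.2.1
  (if (PySem.Chars.strip cur).isEmpty then cols
   else cols ++ [PySem.Chars.strip cur]).map String.ofList

-- ===== PORT B =====
-- B's inner scan of one fragment: update (paren, quotes) only.
def pvStepB (pq : Int × Bool) (c : Char) : Int × Bool :=
  if c == '\'' then (pq.1, !pq.2)
  else if c == '(' && !pq.2 then (pq.1 + 1, pq.2)
  else if c == ')' && !pq.2 then (pq.1 - 1, pq.2)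
  else pq

-- B's fragment loop: last fragment is only appended to the buffer, which is then emitted.
def pvBLoop (cols : List (List Char)) (buf : List Char) (p : Int) (q : Bool) :
    List (List Char) → List (List Char)
  | [] => cols
  | [last] =>
      let buf := buf ++ last
      if (PySem.Chars.strip buf).isEmpty then cols else cols ++ [PySem.Chars.strip buf]
  | part :: rest =>
      let buf := buf ++ part
      let pq := part.foldl pvStepB (p, q)
      if pq.1 == 0 && !pq.2 then
        pvBLoop (if (PySem.Chars.strip buf).isEmpty then cols
                 else cols ++ [PySem.Chars.strip buf]) [] pq.1 pq.2 rest
      else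
        pvBLoop cols (buf ++ [',']) pq.1 pq.2 rest

def split_select_columns_py_alt (select_part : String) : List String :=
  (pvBLoop [] [] 0 false (select_part.toList.splitOn ',')).map String.ofList

-- ===== PRECONDITION & SPEC =====
def Spec_split_select_columns_py (select_part : String) (out : List String) : Prop := out = split_select_columns_py_alt select_part
instance (select_part : String) (out : List String) : Decidable (Spec_split_select_columns_py select_part out) := by unfold Spec_split_select_columns_py; infer_instance

-- ===== CLAIM (what is proved, stated in full; the proofs are below) =====
def Claim_equal_split_select_columns_py : Prop := ∀ (select_part : String), Dom_split_select_columns_py select_part → Spec_split_select_columns_py select_part (split_select_columns_py select_part)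

-- ===== LEMMAS AND PROOFS =====

-- A comma-free fragment only appends to the buffer and updates (paren, quotes) as pvStepB does.
theorem foldl_stepA_comma_free (f : List Char) :
    ∀ (cols : List (List Char)) (buf : List Char) (p : Int) (q : Bool), ',' ∉ f →
      f.foldl pvStepA (cols, buf, p, q) = (cols, buf ++ f, f.foldl pvStepB (p, q)) := by
  induction f with
  | nil => intro cols buf p q _; simp
  | cons c f ih =>
      intro cols buf p q hmem
      have hc : c ≠ ',' := fun h => hmem (h ▸ List.mem_cons_self)
      have hf : ',' ∉ f := fun h => hmem (List.mem_cons_of_mem _ h)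
      have hstep : pvStepA (cols, buf, p, q) c = (cols, buf ++ [c], pvStepB (p, q) c) := by
        simp only [pvStepA, pvStepB]
        cases q <;> by_cases h1 : c = '\'' <;> by_cases h2 : c = '(' <;> by_cases h3 : c = ')' <;>
          simp_all
      rcases hx : pvStepB (p, q) c with ⟨p', q'⟩
      rw [List.foldl_cons, hstep, hx, ih _ _ _ _ hf]
      simp [hx]

-- Running A's loop over the ','-rejoined fragments equals B's fragment loop (plus A's final emit).
theorem bLoop_eq_foldl (parts : List (List Char)) :
    ∀ (cols : List (List Char)) (buf : List Char) (p : Int) (q : Bool),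
      parts ≠ [] → (∀ f ∈ parts, ',' ∉ f) →
      pvBLoop cols buf p q parts =
        (let st := ([','].intercalate parts).foldl pvStepA (cols, buf, p, q)
         if (PySem.Chars.strip st.2.1).isEmpty then st.1 else st.1 ++ [PySem.Chars.strip st.2.1]) := by
  induction parts with
  | nil => intro _ _ _ _ h _; exact absurd rfl h
  | cons part rest ih =>
      intro cols buf p q _ hfree
      have hpart : ',' ∉ part := hfree part List.mem_cons_self
      cases rest with
      | nil =>
          simp only [pvBLoop, List.intercalate]
          rw [show (List.intersperse [','] [part]).flatten = part by simp]
          rw [foldl_stepA_comma_free part cols buf p q hpart]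
      | cons part2 rest2 =>
          have hrest : ∀ f ∈ part2 :: rest2, ',' ∉ f := fun f hf => hfree f (List.mem_cons_of_mem _ hf)
          have hinter : [','].intercalate (part :: part2 :: rest2)
              = part ++ ',' :: [','].intercalate (part2 :: rest2) := by
            simp [List.intercalate, List.intersperse]
          rw [hinter]
          simp only [pvBLoop]
          rw [List.foldl_append, foldl_stepA_comma_free part cols buf p q hpart]
          rcases hpq : part.foldl pvStepB (p, q) with ⟨p', q'⟩
          simp only [List.foldl_cons]
          have hcomma : pvStepA (cols, buf ++ part, p', q') ',' =
              (if p' == 0 && !q' then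
                ((if (PySem.Chars.strip (buf ++ part)).isEmpty then cols
                  else cols ++ [PySem.Chars.strip (buf ++ part)]), ([] : List Char), p', q')
               else (cols, (buf ++ part) ++ [','], p', q')) := by
            simp only [pvStepA]
            cases q' <;> by_cases hp : p' = 0 <;> simp_all
          rw [hcomma]
          by_cases hcond : (p' == 0 && !q') = true
          · rw [if_pos hcond, if_pos hcond]
            exact ih _ _ _ _ (by simp) hrest
          · rw [if_neg hcond, if_neg hcond]
            exact ih _ _ _ _ (by simp) hrest

-- Every piece of splitOn contains no separator.
theorem splitOn_comma_free (sep : Char) (xs : List Char) :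
    ∀ f ∈ xs.splitOn sep, sep ∉ f := by
  induction xs with
  | nil => intro f hf; simp [List.splitOn, List.splitOnP_nil] at hf; simp [hf]
  | cons c xs ih =>
      intro f hf
      simp only [List.splitOn, List.splitOnP_cons] at hf
      by_cases hc : c = sep
      · simp only [hc, beq_self_eq_true, if_pos] at hf
        rcases List.mem_cons.mp hf with h | h
        · simp [h]
        · exact ih f h
      · simp only [beq_iff_eq, hc, if_false] at hf
        cases hxs : xs.splitOnP (· == sep) with
        | nil => exact absurd hxs (List.splitOnP_ne_nil _ _)
        | cons g gs =>
            rw [hxs] at hf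
            simp only [List.modifyHead] at hf
            rcases List.mem_cons.mp hf with h | h
            · subst h
              intro hmem
              rcases List.mem_cons.mp hmem with h | h
              · exact hc h.symm
              · exact ih g (by rw [List.splitOn, hxs]; exact List.mem_cons_self) h
            · exact ih f (by rw [List.splitOn, hxs]; exact List.mem_cons_of_mem _ h)

-- ===== VERDICT (by name: the statement is the Claim_ definition above) =====
theorem split_select_columns_py_spec : Claim_equal_split_select_columns_py := by
  intro s _
  unfold Spec_split_select_columns_py split_select_columns_py split_select_columns_py_alt
  rw [bLoop_eq_foldl (s.toList.splitOn ',') [] [] 0 false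
        (List.splitOnP_ne_nil _ _) (splitOn_comma_free ',' s.toList)]
  rw [List.intercalate_splitOn]
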